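-- pv_equiv track=rewrite | github.com/seohye-ki/morning-in-algo | seohapark/Week3/10.23.py | convert_codon
-- ===== SOURCE A (Python) =====
-- def convert_codon(a):
--     ret = 0
--     for i in range(3):
--         if a[i] == 'A':
--             ret = (ret << 2) + 0
--         elif a[i] == 'C':
--             ret = (ret << 2) + 1
--         elif a[i] == 'G':
--             ret = (ret << 2) + 2
--         else:
--             ret = (ret << 2) + 3
--     return ret
-- ===== SOURCE B (Python) =====
-- def convert_codon(a):
--     d = {'A': 0, 'C': 1, 'G': 2}
--     s = ''.join(str(d.get(a[i], 3)) for i in range(3))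
--     return int(s, 4)
-- ===== Notes on version B (the rewrite author's own statement) =====
-- stated objective: idiomatic
-- what changed: B maps the three characters to base-4 digit characters via a dict and lets int(s, 4) perform the positional arithmetic, replacing A's hand-rolled shift-and-add accumulator loop.
import Mathlib
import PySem

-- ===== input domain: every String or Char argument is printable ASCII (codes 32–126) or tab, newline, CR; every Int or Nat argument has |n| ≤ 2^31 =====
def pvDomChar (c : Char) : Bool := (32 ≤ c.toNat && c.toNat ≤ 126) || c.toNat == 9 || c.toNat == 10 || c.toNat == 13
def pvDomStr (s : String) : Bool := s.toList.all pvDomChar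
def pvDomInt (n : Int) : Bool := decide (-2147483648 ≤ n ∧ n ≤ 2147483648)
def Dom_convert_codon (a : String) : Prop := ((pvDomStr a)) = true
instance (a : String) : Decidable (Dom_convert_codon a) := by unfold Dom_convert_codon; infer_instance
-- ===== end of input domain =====

-- B replaces A's shift-and-add accumulator loop by mapping the characters to base-4
-- digit characters and handing the positional arithmetic to int(s, 4) (idiomatic, same cost).

-- ===== PORT A =====
-- (ret << 2) on a Python int is exactly ret * 4
def convert_codon (a : String) : Int :=
  (PySem.List.pyRange 0 3 1).foldl (fun ret i =>
    match PySem.Str.pyGet? a i with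
    | none => ret  -- IndexError in Python; excluded by Pre_
    | some c =>
      if c = 'A' then ret * 4 + 0
      else if c = 'C' then ret * 4 + 1
      else if c = 'G' then ret * 4 + 2
      else ret * 4 + 3) 0

-- ===== PORT B =====
-- d.get(a[i], 3) through a PySem.Dict, str(digit) via PySem.Int.toChars (join = flatten),
-- and int(s, 4) via PySem.Int.ofCharsBase? (the library base-4 parser).
def convert_codon_alt (a : String) : Int :=
  let d : PySem.Dict Char Int := PySem.Dict.ofList [('A', 0), ('C', 1), ('G', 2)]
  let s : List Char := ((PySem.List.pyRange 0 3 1).map (fun i =>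
    match PySem.Str.pyGet? a i with
    | none => PySem.Int.toChars 3  -- IndexError in Python; excluded by Pre_
    | some c => PySem.Int.toChars (d.getD c 3))).flatten
  (PySem.Int.ofCharsBase? s 4).getD 0

-- ===== PRECONDITION & SPEC =====
-- Both A and B raise IndexError when the string has fewer than 3 characters.
def Pre_convert_codon (a : String) : Prop := 3 ≤ a.toList.length
instance (a : String) : Decidable (Pre_convert_codon a) := by unfold Pre_convert_codon; infer_instance
def pvWitness_convert_codon : String := "ACG"

def Spec_convert_codon (a : String) (out : Int) : Prop := out = convert_codon_alt a
instance (a : String) (out : Int) : Decidable (Spec_convert_codon a out) := by unfold Spec_convert_codon; infer_instance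

-- ===== CLAIM (what is proved, stated in full; the proofs are below) =====
def Claim_equal_convert_codon : Prop := ∀ (a : String), Dom_convert_codon a → Pre_convert_codon a → Spec_convert_codon a (convert_codon a)

-- ===== LEMMAS AND PROOFS =====

-- the common digit value of A's branch chain and B's dict lookup
def pvDigitOf (c : Char) : Int :=
  if c = 'A' then 0 else if c = 'C' then 1 else if c = 'G' then 2 else 3

theorem pvDigitOf_bounds (c : Char) : 0 ≤ pvDigitOf c ∧ pvDigitOf c < 4 := by
  unfold pvDigitOf; split_ifs <;> omega

theorem pv_range3 : PySem.List.pyRange 0 3 1 = [0, 1, 2] := by decide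

theorem pv_dictofList :
    (PySem.Dict.ofList [('A', (0:Int)), ('C', 1), ('G', 2)]) =
      PySem.Dict.mk [('A', 0), ('C', 1), ('G', 2)] := by decide

theorem pv_dict (c : Char) :
    (PySem.Dict.ofList [('A', (0:Int)), ('C', 1), ('G', 2)]).getD c 3 = pvDigitOf c := by
  rw [pv_dictofList]
  have f : ∀ x : Char, ¬ c = x → (x == c) = false := fun x h => by
    simp [beq_eq_false_iff_ne, Ne.symm h]
  simp only [PySem.Dict.getD, PySem.Dict.get?, List.find?, pvDigitOf]
  by_cases hA : c = 'A'
  · subst hA; simp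
  · by_cases hC : c = 'C'
    · subst hC; simp [f _ hA]
    · by_cases hG : c = 'G'
      · subst hG; simp [f _ hA, f _ hC]
      · simp [f _ hA, f _ hC, f _ hG, hA, hC, hG]

theorem pv_get0 (a : String) (c0 c1 c2 : Char) (rest : List Char)
    (htl : a.toList = c0 :: c1 :: c2 :: rest) : PySem.Str.pyGet? a 0 = some c0 := by
  simp [htl, PySem.List.pyGet?, PySem.List.pyIdx?]
  rw [if_pos (by omega)]; simp

theorem pv_get1 (a : String) (c0 c1 c2 : Char) (rest : List Char)
    (htl : a.toList = c0 :: c1 :: c2 :: rest) : PySem.Str.pyGet? a 1 = some c1 := by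
  simp [htl, PySem.List.pyGet?, PySem.List.pyIdx?]
  rw [if_pos (by omega)]; simp

theorem pv_get2 (a : String) (c0 c1 c2 : Char) (rest : List Char)
    (htl : a.toList = c0 :: c1 :: c2 :: rest) : PySem.Str.pyGet? a 2 = some c2 := by
  simp [htl, PySem.List.pyGet?, PySem.List.pyIdx?]
  rw [if_pos (by omega)]; simp

set_option maxHeartbeats 1000000 in
theorem pv_a_side (a : String) (c0 c1 c2 : Char) (rest : List Char)
    (htl : a.toList = c0 :: c1 :: c2 :: rest) :
    convert_codon a = (pvDigitOf c0 * 4 + pvDigitOf c1) * 4 + pvDigitOf c2 := by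
  unfold convert_codon
  rw [pv_range3]
  simp only [List.foldl]
  rw [pv_get0 a c0 c1 c2 rest htl, pv_get1 a c0 c1 c2 rest htl, pv_get2 a c0 c1 c2 rest htl]
  simp only [pvDigitOf]
  split_ifs <;> ring

theorem pv_b_side (a : String) (c0 c1 c2 : Char) (rest : List Char)
    (htl : a.toList = c0 :: c1 :: c2 :: rest) :
    convert_codon_alt a =
      (PySem.Int.ofCharsBase?
        (PySem.Int.toChars (pvDigitOf c0) ++ PySem.Int.toChars (pvDigitOf c1) ++
         PySem.Int.toChars (pvDigitOf c2)) 4).getD 0 := by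
  simp only [convert_codon_alt, pv_range3, List.map, List.flatten,
    pv_get0 a c0 c1 c2 rest htl, pv_get1 a c0 c1 c2 rest htl, pv_get2 a c0 c1 c2 rest htl,
    pv_dict]
  simp [List.append_assoc]

theorem pv_parse3 (d0 d1 d2 : Int) (h0 : 0 ≤ d0 ∧ d0 < 4) (h1 : 0 ≤ d1 ∧ d1 < 4)
    (h2 : 0 ≤ d2 ∧ d2 < 4) :
    (PySem.Int.ofCharsBase?
      (PySem.Int.toChars d0 ++ PySem.Int.toChars d1 ++ PySem.Int.toChars d2) 4).getD 0 =
      (d0 * 4 + d1) * 4 + d2 := by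
  obtain ⟨h0a, h0b⟩ := h0; obtain ⟨h1a, h1b⟩ := h1; obtain ⟨h2a, h2b⟩ := h2
  interval_cases d0 <;> interval_cases d1 <;> interval_cases d2 <;> decide

-- ===== VERDICT (by name: the statement is the Claim_ definition above) =====
theorem convert_codon_spec : Claim_equal_convert_codon := by
  intro a _ hpre
  unfold Spec_convert_codon
  rcases htl : a.toList with _ | ⟨c0, _ | ⟨c1, _ | ⟨c2, rest⟩⟩⟩
  · exact absurd hpre (by simp [Pre_convert_codon, htl])
  · exact absurd hpre (by simp [Pre_convert_codon, htl])
  · exact absurd hpre (by simp [Pre_convert_codon, htl])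
  · rw [pv_a_side a c0 c1 c2 rest htl, pv_b_side a c0 c1 c2 rest htl,
      pv_parse3 _ _ _ (pvDigitOf_bounds c0) (pvDigitOf_bounds c1) (pvDigitOf_bounds c2)]
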